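-- pv_equiv track=rewrite | github.com/AvichalDwivedi2205/Innerverse | agents/nutrition_agent/nutrition_data.py | _meets_dietary_restrictions
-- ===== SOURCE A (Python) =====
-- from typing import Dict, List, Optional, Any
--
-- def _meets_dietary_restrictions(food_data: Dict, restrictions: List[str]) -> bool:
--     """Check if food meets dietary restrictions."""
--
--     if not restrictions:
--         return True
--
--     food_name = food_data.get('name', '').lower()
--     category = food_data.get('category', '').lower()
--
--     for restriction in restrictions:
--         restriction_lower = restriction.lower()
--
--         # Vegetarian restrictions
--         if restriction_lower in ['vegetarian', 'vegan']:
--             if category == 'protein' and any(meat in food_name for meat in ['chicken', 'beef', 'pork', 'fish', 'salmon']):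
--                 return False
--             if restriction_lower == 'vegan' and any(dairy in food_name for dairy in ['cheese', 'milk', 'yogurt', 'egg']):
--                 return False
--
--         # Gluten-free restrictions
--         elif restriction_lower == 'gluten-free':
--             if any(gluten in food_name for gluten in ['wheat', 'barley', 'rye', 'pasta', 'bread']):
--                 return False
--
--         # Dairy-free restrictions
--         elif restriction_lower == 'dairy-free':
--             if any(dairy in food_name for dairy in ['cheese', 'milk', 'yogurt', 'dairy']):
--                 return False
--
--     return True
-- ===== SOURCE B (Python) =====
-- from typing import Dict, List
--
-- _MEATS = ('chicken', 'beef', 'pork', 'fish', 'salmon')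
-- _VEGAN_DAIRY = ('cheese', 'milk', 'yogurt', 'egg')
-- _GLUTEN = ('wheat', 'barley', 'rye', 'pasta', 'bread')
-- _DAIRY = ('cheese', 'milk', 'yogurt', 'dairy')
--
-- def _meets_dietary_restrictions(food_data: Dict, restrictions: List[str]) -> bool:
--     """Check if food meets dietary restrictions (flag-based, no loop over restrictions)."""
--     restr = {r.lower() for r in restrictions}
--     name = food_data.get('name', '').lower()
--     category = food_data.get('category', '').lower()
--     return not (
--         (({'vegetarian', 'vegan'} & restr) and category == 'protein'
--          and any(m in name for m in _MEATS))
--         or ('vegan' in restr and any(d in name for d in _VEGAN_DAIRY))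
--         or ('gluten-free' in restr and any(g in name for g in _GLUTEN))
--         or ('dairy-free' in restr and any(d in name for d in _DAIRY))
--     )
-- ===== Notes on version B (the rewrite author's own statement) =====
-- stated objective: simpler
-- what changed: Replaces the loop over restrictions with a lowercased set built once and four independent flag conditions combined into a single boolean expression (no early-return loop, no if/elif chain).
import Mathlib
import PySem

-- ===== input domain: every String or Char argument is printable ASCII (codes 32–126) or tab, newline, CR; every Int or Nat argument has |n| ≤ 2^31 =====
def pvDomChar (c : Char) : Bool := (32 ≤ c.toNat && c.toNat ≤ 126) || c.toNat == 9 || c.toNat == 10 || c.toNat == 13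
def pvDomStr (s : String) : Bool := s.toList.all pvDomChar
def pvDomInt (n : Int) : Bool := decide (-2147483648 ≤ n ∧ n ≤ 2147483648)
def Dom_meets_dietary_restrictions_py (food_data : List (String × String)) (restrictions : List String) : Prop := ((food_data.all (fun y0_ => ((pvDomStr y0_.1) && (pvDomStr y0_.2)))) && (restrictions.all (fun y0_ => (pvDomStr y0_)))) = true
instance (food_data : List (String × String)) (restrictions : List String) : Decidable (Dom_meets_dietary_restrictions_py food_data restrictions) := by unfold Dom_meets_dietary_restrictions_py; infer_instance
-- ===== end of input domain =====

-- B replaces A's early-return loop over restrictions by a lowercased set built once and four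
-- independent flag conditions combined into one boolean expression (objective: simpler).

-- ===== PORT A =====
-- the substring groups of the source (module-level tuples in Source B, inline literals in A; shared constants)
def mdrMeat (s : String) : Bool := ["chicken", "beef", "pork", "fish", "salmon"].any (fun m => PySem.Str.isIn m s)
def mdrVeganDairy (s : String) : Bool := ["cheese", "milk", "yogurt", "egg"].any (fun d => PySem.Str.isIn d s)
def mdrGluten (s : String) : Bool := ["wheat", "barley", "rye", "pasta", "bread"].any (fun g => PySem.Str.isIn g s)
def mdrDairy (s : String) : Bool := ["cheese", "milk", "yogurt", "dairy"].any (fun d => PySem.Str.isIn d s)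

-- the for-loop of A: returns false at the first restriction that fails, else recurses
def mdrLoop (food_name category : String) : List String → Bool
  | [] => true
  | r :: rest =>
    let rl := PySem.Str.lower r
    if rl == "vegetarian" || rl == "vegan" then
      if category == "protein" && mdrMeat food_name then false
      else if rl == "vegan" && mdrVeganDairy food_name then false
      else mdrLoop food_name category rest
    else if rl == "gluten-free" then
      if mdrGluten food_name then false else mdrLoop food_name category rest
    else if rl == "dairy-free" then
      if mdrDairy food_name then false else mdrLoop food_name category rest
    else mdrLoop food_name category rest

def meets_dietary_restrictions_py (food_data : List (String × String)) (restrictions : List String) : Bool :=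
  if restrictions.isEmpty then true
  else
    -- food_name / category: the two dict lookups, inlined
    mdrLoop (PySem.Str.lower ((PySem.Dict.ofList food_data).getD "name" ""))
            (PySem.Str.lower ((PySem.Dict.ofList food_data).getD "category" "")) restrictions

-- ===== PORT B =====
def mdrRestr (restrictions : List String) : PySem.Set String := PySem.Set.ofList (restrictions.map PySem.Str.lower)
def mdrName (food_data : List (String × String)) : String := PySem.Str.lower ((PySem.Dict.ofList food_data).getD "name" "")
def mdrCategory (food_data : List (String × String)) : String := PySem.Str.lower ((PySem.Dict.ofList food_data).getD "category" "")

def meets_dietary_restrictions_py_alt (food_data : List (String × String)) (restrictions : List String) : Bool :=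
  !((((mdrRestr restrictions).contains "vegetarian" || (mdrRestr restrictions).contains "vegan") && (mdrCategory food_data == "protein") && mdrMeat (mdrName food_data))
    || ((mdrRestr restrictions).contains "vegan" && mdrVeganDairy (mdrName food_data))
    || ((mdrRestr restrictions).contains "gluten-free" && mdrGluten (mdrName food_data))
    || ((mdrRestr restrictions).contains "dairy-free" && mdrDairy (mdrName food_data)))

-- ===== PRECONDITION & SPEC =====
def Spec_meets_dietary_restrictions_py (food_data : List (String × String)) (restrictions : List String) (out : Bool) : Prop := out = meets_dietary_restrictions_py_alt food_data restrictions
instance (food_data : List (String × String)) (restrictions : List String) (out : Bool) : Decidable (Spec_meets_dietary_restrictions_py food_data restrictions out) := by unfold Spec_meets_dietary_restrictions_py; infer_instance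

-- ===== CLAIM (what is proved, stated in full; the proofs are below) =====
def Claim_equal_meets_dietary_restrictions_py : Prop := ∀ (food_data : List (String × String)) (restrictions : List String), Dom_meets_dietary_restrictions_py food_data restrictions → Spec_meets_dietary_restrictions_py food_data restrictions (meets_dietary_restrictions_py food_data restrictions)

-- ===== LEMMAS AND PROOFS =====

-- the per-restriction failure condition of A's loop body, as a function of the lowercased restriction
def mdrBad (food_name category : String) (rl : String) : Bool :=
  ((rl == "vegetarian" || rl == "vegan") && (category == "protein") && mdrMeat food_name)
  || (rl == "vegan" && mdrVeganDairy food_name)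
  || (rl == "gluten-free" && mdrGluten food_name)
  || (rl == "dairy-free" && mdrDairy food_name)

theorem beq_two (s a b : String) (h : a ≠ b) : ((s == a) && (s == b)) = false := by
  cases h1 : s == a <;> cases h2 : s == b <;> simp_all

-- A's loop returns true exactly when no restriction triggers mdrBad
theorem mdrLoop_eq_not_any (food_name category : String) (rs : List String) :
    mdrLoop food_name category rs = !(rs.any (fun r => mdrBad food_name category (PySem.Str.lower r))) := by
  induction rs with
  | nil => rfl
  | cons r rest ih =>
    simp only [mdrLoop, List.any_cons, Bool.not_or, ih]
    have h12 := beq_two (PySem.Str.lower r) "vegetarian" "vegan" (by decide)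
    have h13 := beq_two (PySem.Str.lower r) "vegetarian" "gluten-free" (by decide)
    have h14 := beq_two (PySem.Str.lower r) "vegetarian" "dairy-free" (by decide)
    have h23 := beq_two (PySem.Str.lower r) "vegan" "gluten-free" (by decide)
    have h24 := beq_two (PySem.Str.lower r) "vegan" "dairy-free" (by decide)
    have h34 := beq_two (PySem.Str.lower r) "gluten-free" "dairy-free" (by decide)
    generalize (!(rest.any (fun r => mdrBad food_name category (PySem.Str.lower r)))) = L
    simp only [mdrBad]
    generalize (category == "protein") = c
    generalize (mdrMeat food_name) = m
    generalize (mdrVeganDairy food_name) = v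
    generalize (mdrGluten food_name) = g
    generalize (mdrDairy food_name) = dd
    generalize hq1 : (PySem.Str.lower r == "vegetarian") = e1 at h12 h13 h14 ⊢
    generalize hq2 : (PySem.Str.lower r == "vegan") = e2 at h12 h23 h24 ⊢
    generalize hq3 : (PySem.Str.lower r == "gluten-free") = e3 at h13 h23 h34 ⊢
    generalize hq4 : (PySem.Str.lower r == "dairy-free") = e4 at h14 h24 h34 ⊢
    clear hq1 hq2 hq3 hq4 ih
    revert h12 h13 h14 h23 h24 h34
    revert e1 e2 e3 e4 c m v g dd L
    decide

theorem set_contains_iff (xs : List String) (x : String) :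
    (PySem.Set.ofList xs).contains x = xs.contains x := by
  simp [PySem.Set.mem_ofList]

theorem contains_map_lower (rs : List String) (s : String) :
    (rs.map PySem.Str.lower).contains s = rs.any (fun r => PySem.Str.lower r == s) := by
  rw [Bool.eq_iff_iff]
  simp only [List.contains_iff_mem, List.mem_map, List.any_eq_true, beq_iff_eq]

-- the disjunction over the list distributes into B's four flag conditions
theorem any_bad_eq (food_name category : String) (rs : List String) :
    (rs.any (fun r => mdrBad food_name category (PySem.Str.lower r)))
    = (((rs.any (fun r => PySem.Str.lower r == "vegetarian") || rs.any (fun r => PySem.Str.lower r == "vegan")) && (category == "protein") && mdrMeat food_name)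
       || (rs.any (fun r => PySem.Str.lower r == "vegan") && mdrVeganDairy food_name)
       || (rs.any (fun r => PySem.Str.lower r == "gluten-free") && mdrGluten food_name)
       || (rs.any (fun r => PySem.Str.lower r == "dairy-free") && mdrDairy food_name)) := by
  rw [Bool.eq_iff_iff]
  simp only [List.any_eq_true, mdrBad, Bool.or_eq_true, Bool.and_eq_true]
  constructor
  · rintro ⟨x, hx, (((⟨⟨hv, hp⟩, hm⟩ | ⟨hv, hd⟩) | ⟨hg, hh⟩) | ⟨hd2, hh⟩)⟩
    · exact Or.inl (Or.inl (Or.inl ⟨⟨hv.imp (fun h => ⟨x, hx, h⟩) (fun h => ⟨x, hx, h⟩), hp⟩, hm⟩))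
    · exact Or.inl (Or.inl (Or.inr ⟨⟨x, hx, hv⟩, hd⟩))
    · exact Or.inl (Or.inr ⟨⟨x, hx, hg⟩, hh⟩)
    · exact Or.inr ⟨⟨x, hx, hd2⟩, hh⟩
  · rintro (((⟨⟨(⟨x, hx, hv⟩ | ⟨x, hx, hv⟩), hp⟩, hm⟩ | ⟨⟨x, hx, hv⟩, hd⟩) | ⟨⟨x, hx, hg⟩, hh⟩) | ⟨⟨x, hx, hd2⟩, hh⟩)
    · exact ⟨x, hx, Or.inl (Or.inl (Or.inl ⟨⟨Or.inl hv, hp⟩, hm⟩))⟩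
    · exact ⟨x, hx, Or.inl (Or.inl (Or.inl ⟨⟨Or.inr hv, hp⟩, hm⟩))⟩
    · exact ⟨x, hx, Or.inl (Or.inl (Or.inr ⟨hv, hd⟩))⟩
    · exact ⟨x, hx, Or.inl (Or.inr ⟨hg, hh⟩)⟩
    · exact ⟨x, hx, Or.inr ⟨hd2, hh⟩⟩

-- ===== VERDICT (by name: the statement is the Claim_ definition above) =====
theorem meets_dietary_restrictions_py_spec : Claim_equal_meets_dietary_restrictions_py := by
  intro food_data restrictions _
  unfold Spec_meets_dietary_restrictions_py meets_dietary_restrictions_py meets_dietary_restrictions_py_alt mdrRestr mdrName mdrCategory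
  rw [mdrLoop_eq_not_any, any_bad_eq]
  simp only [set_contains_iff, contains_map_lower]
  cases restrictions <;> simp
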